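-- pv_equiv track=rewrite | github.com/phanindranalla/Voteguide | agent.py | _detect_relevant_stage
-- ===== SOURCE A (Python) =====
-- def _detect_relevant_stage(message: str) -> int | None:
--     """Detect which election stage is most relevant to the user's message based on keywords.
--
--     Returns stage id (1-8) or None if no match found.
--     """
--     message_lower = message.lower()
--
--     keyword_map = {
--         1: ["announcement", "declared", "schedule", "dates", "when is"],
--         2: ["register", "registration", "voter id", "enroll", "sign up"],
--         3: ["nomination", "candidate", "file", "eligib", "contest"],
--         4: ["campaign", "rally", "manifesto", "advertis", "debate"],
--         5: ["vote", "ballot", "polling station", "voting day", "cast"],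
--         6: ["count", "tally", "counting", "results coming", "tabulate"],
--         7: ["result", "winner", "declared won", "officially", "gazette"],
--         8: ["transition", "sworn", "oath", "takes office", "handover"]
--     }
--
--     for stage_id, keywords in keyword_map.items():
--         if any(kw in message_lower for kw in keywords):
--             return stage_id
--     return None
-- ===== SOURCE B (Python) =====
-- _FLAT_KEYWORDS = [
--     ("announcement", 1), ("declared", 1), ("schedule", 1), ("dates", 1), ("when is", 1),
--     ("register", 2), ("registration", 2), ("voter id", 2), ("enroll", 2), ("sign up", 2),
--     ("nomination", 3), ("candidate", 3), ("file", 3), ("eligib", 3), ("contest", 3),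
--     ("campaign", 4), ("rally", 4), ("manifesto", 4), ("advertis", 4), ("debate", 4),
--     ("vote", 5), ("ballot", 5), ("polling station", 5), ("voting day", 5), ("cast", 5),
--     ("count", 6), ("tally", 6), ("counting", 6), ("results coming", 6), ("tabulate", 6),
--     ("result", 7), ("winner", 7), ("declared won", 7), ("officially", 7), ("gazette", 7),
--     ("transition", 8), ("sworn", 8), ("oath", 8), ("takes office", 8), ("handover", 8),
-- ]
--
--
-- def _detect_relevant_stage(message: str):
--     """Flat keyword table, single pass: the answer is the minimum stage id among
--     all matching keywords (stage ids are 1..8 in order, so min = first match)."""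
--     message_lower = message.lower()
--     return min((sid for kw, sid in _FLAT_KEYWORDS if kw in message_lower), default=None)
-- ===== Notes on version B (the rewrite author's own statement) =====
-- stated objective: alternative
-- what changed: Replaced the early-exit loop over a stage->keywords dict with a single pass over a flat (keyword, stage) table that takes the minimum matching stage id (min with default=None), relying on stage ids being 1..8 in order.
import Mathlib
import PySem

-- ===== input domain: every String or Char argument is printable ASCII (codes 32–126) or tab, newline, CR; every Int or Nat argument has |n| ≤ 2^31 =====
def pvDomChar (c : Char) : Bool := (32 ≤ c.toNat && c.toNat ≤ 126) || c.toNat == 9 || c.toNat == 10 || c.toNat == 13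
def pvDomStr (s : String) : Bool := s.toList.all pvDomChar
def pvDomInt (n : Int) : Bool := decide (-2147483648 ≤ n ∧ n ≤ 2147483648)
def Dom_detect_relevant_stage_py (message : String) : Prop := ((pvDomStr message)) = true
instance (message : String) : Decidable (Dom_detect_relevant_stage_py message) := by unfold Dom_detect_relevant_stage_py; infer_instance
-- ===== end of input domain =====

-- B replaces A's early-exit loop over a stage->keywords dict by one pass over a flat
-- (keyword, stage) table taking the minimum matching stage id (alternative decomposition, same cost).


-- ===== PORT A =====
-- keyword_map.items() in insertion order
def pvKeywordMap : List (Int × List String) :=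
  [ (1, ["announcement", "declared", "schedule", "dates", "when is"])
  , (2, ["register", "registration", "voter id", "enroll", "sign up"])
  , (3, ["nomination", "candidate", "file", "eligib", "contest"])
  , (4, ["campaign", "rally", "manifesto", "advertis", "debate"])
  , (5, ["vote", "ballot", "polling station", "voting day", "cast"])
  , (6, ["count", "tally", "counting", "results coming", "tabulate"])
  , (7, ["result", "winner", "declared won", "officially", "gazette"])
  , (8, ["transition", "sworn", "oath", "takes office", "handover"]) ]

-- the for-loop with early return
def pvLoopA (ml : String) : List (Int × List String) → Option Int
  | [] => none
  | (sid, kws) :: rest =>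
      if kws.any (fun kw => PySem.Str.isIn kw ml) then some sid else pvLoopA ml rest

def detect_relevant_stage_py (message : String) : Option Int :=
  pvLoopA (PySem.Str.lower message) pvKeywordMap

-- ===== PORT B =====
def pvFlatKeywords : List (String × Int) :=
  [ ("announcement", 1), ("declared", 1), ("schedule", 1), ("dates", 1), ("when is", 1)
  , ("register", 2), ("registration", 2), ("voter id", 2), ("enroll", 2), ("sign up", 2)
  , ("nomination", 3), ("candidate", 3), ("file", 3), ("eligib", 3), ("contest", 3)
  , ("campaign", 4), ("rally", 4), ("manifesto", 4), ("advertis", 4), ("debate", 4)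
  , ("vote", 5), ("ballot", 5), ("polling station", 5), ("voting day", 5), ("cast", 5)
  , ("count", 6), ("tally", 6), ("counting", 6), ("results coming", 6), ("tabulate", 6)
  , ("result", 7), ("winner", 7), ("declared won", 7), ("officially", 7), ("gazette", 7)
  , ("transition", 8), ("sworn", 8), ("oath", 8), ("takes office", 8), ("handover", 8) ]

-- min((sid for kw, sid in _FLAT_KEYWORDS if kw in message_lower), default=None)
def detect_relevant_stage_py_alt (message : String) : Option Int :=
  let ml := PySem.Str.lower message
  PySem.List.min?
    ((pvFlatKeywords.filter (fun p => PySem.Str.isIn p.1 ml)).map Prod.snd)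
    (fun x => x)

-- ===== PRECONDITION & SPEC =====
def Spec_detect_relevant_stage_py (message : String) (out : Option Int) : Prop := out = detect_relevant_stage_py_alt message
instance (message : String) (out : Option Int) : Decidable (Spec_detect_relevant_stage_py message out) := by unfold Spec_detect_relevant_stage_py; infer_instance

-- ===== CLAIM (what is proved, stated in full; the proofs are below) =====
def Claim_equal_detect_relevant_stage_py : Prop := ∀ (message : String), Dom_detect_relevant_stage_py message → Spec_detect_relevant_stage_py message (detect_relevant_stage_py message)

-- ===== LEMMAS AND PROOFS =====

-- foldl min stays at the start element when it is minimal
theorem pv_foldl_min_eq_self (t : List Int) (x : Int) (h : ∀ y ∈ t, x ≤ y) :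
    t.foldl min x = x := by
  induction t generalizing x with
  | nil => rfl
  | cons y t ih =>
      simp only [List.foldl_cons]
      rw [min_eq_left (h y (by simp))]
      exact ih x (fun z hz => h z (by simp [hz]))

-- on a nondecreasing list, Python's min is the head
theorem pv_min?_of_pairwise (l : List Int) (h : l.Pairwise (· ≤ ·)) :
    PySem.List.min? l (fun x => x) = l.head? := by
  cases l with
  | nil => simp [PySem.List.min?]
  | cons x t =>
      rw [PySem.List.min?_id_cons]
      rw [pv_foldl_min_eq_self t x (List.pairwise_cons.mp h).1]
      rfl

-- one stage block of the flat table, under filter+map+head?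
theorem pv_head_block (p : String → Bool) (i : Int) (kws : List String)
    (rest : List (String × Int)) :
    ((((kws.map fun k => (k, i)) ++ rest).filter (fun q => p q.1)).map Prod.snd).head? =
      if kws.any p then some i
      else (((rest.filter (fun q => p q.1)).map Prod.snd).head?) := by
  induction kws with
  | nil => simp
  | cons k kws ih =>
      cases hk : p k with
      | true => simp [hk]
      | false =>
          simp only [List.map_cons, List.cons_append, List.filter_cons, hk]
          simpa [hk] using ih

-- ===== VERDICT (by name: the statement is the Claim_ definition above) =====
theorem detect_relevant_stage_py_spec : Claim_equal_detect_relevant_stage_py := by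
  intro message _
  unfold Spec_detect_relevant_stage_py detect_relevant_stage_py detect_relevant_stage_py_alt
  set ml := PySem.Str.lower message with hml
  -- B's filtered stage list is nondecreasing, so its min is its head
  have hbase : pvFlatKeywords.Pairwise (fun a b : String × Int => a.2 ≤ b.2) := by decide
  have hpw : ((pvFlatKeywords.filter (fun p => PySem.Str.isIn p.1 ml)).map Prod.snd).Pairwise
      (· ≤ ·) :=
    List.Pairwise.map Prod.snd (fun a b h => h)
      (List.Pairwise.sublist List.filter_sublist hbase)
  rw [pv_min?_of_pairwise _ hpw]
  -- peel the eight stage blocks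
  show pvLoopA ml pvKeywordMap = _
  have hflat : pvFlatKeywords =
      ((["announcement", "declared", "schedule", "dates", "when is"].map fun k => (k, (1:Int)))
      ++ ((["register", "registration", "voter id", "enroll", "sign up"].map fun k => (k, (2:Int)))
      ++ ((["nomination", "candidate", "file", "eligib", "contest"].map fun k => (k, (3:Int)))
      ++ ((["campaign", "rally", "manifesto", "advertis", "debate"].map fun k => (k, (4:Int)))
      ++ ((["vote", "ballot", "polling station", "voting day", "cast"].map fun k => (k, (5:Int)))
      ++ ((["count", "tally", "counting", "results coming", "tabulate"].map fun k => (k, (6:Int)))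
      ++ ((["result", "winner", "declared won", "officially", "gazette"].map fun k => (k, (7:Int)))
      ++ ((["transition", "sworn", "oath", "takes office", "handover"].map fun k => (k, (8:Int)))
      ++ ([] : List (String × Int)))))))))) := by rfl
  rw [hflat]
  rw [pv_head_block (fun s => PySem.Str.isIn s ml), pv_head_block (fun s => PySem.Str.isIn s ml),
      pv_head_block (fun s => PySem.Str.isIn s ml), pv_head_block (fun s => PySem.Str.isIn s ml),
      pv_head_block (fun s => PySem.Str.isIn s ml), pv_head_block (fun s => PySem.Str.isIn s ml),
      pv_head_block (fun s => PySem.Str.isIn s ml), pv_head_block (fun s => PySem.Str.isIn s ml)]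
  simp only [pvKeywordMap, pvLoopA, List.filter_nil, List.map_nil, List.head?_nil]
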